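-- pv_equiv track=rewrite | github.com/Ionut007Alexandru/laborator | sapt 3.py | max_digit_frequency
-- ===== SOURCE A (Python) =====
-- def max_digit_frequency(s):
--     digit_freq = {}
--     for c in s:
--         if c.isdigit():
--             if c in digit_freq:
--                 digit_freq[c] += 1
--             else:
--                 digit_freq[c] = 1
--     if digit_freq:
--         max_freq = max(digit_freq.values())
--         return max_freq
--     else:
--         return 0
-- ===== SOURCE B (Python) =====
-- def max_digit_frequency(s):
--     digits = sorted(c for c in s if c.isdigit())
--     best = 0
--     cur = 0
--     prev = None
--     for c in digits:
--         cur = cur + 1 if c == prev else 1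
--         prev = c
--         best = max(best, cur)
--     return best
-- ===== Notes on version B (the rewrite author's own statement) =====
-- stated objective: alternative
-- what changed: B replaces A's dict of per-digit counts with a sort of the digit characters followed by a longest-run scan (run lengths in the sorted list are the frequencies).
import Mathlib
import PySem

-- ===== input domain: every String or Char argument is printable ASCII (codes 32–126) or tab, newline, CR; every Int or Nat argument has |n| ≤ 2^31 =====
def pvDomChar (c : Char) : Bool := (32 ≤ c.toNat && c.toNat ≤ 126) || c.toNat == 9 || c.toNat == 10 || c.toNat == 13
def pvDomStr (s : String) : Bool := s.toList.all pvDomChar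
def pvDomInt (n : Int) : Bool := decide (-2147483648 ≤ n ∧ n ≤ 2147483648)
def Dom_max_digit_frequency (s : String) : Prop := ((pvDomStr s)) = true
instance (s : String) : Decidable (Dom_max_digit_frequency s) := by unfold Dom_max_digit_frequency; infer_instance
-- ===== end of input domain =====

-- B replaces A's dict of per-digit counts + max over values with: sort the digit
-- characters, then a longest-run scan (objective: alternative algorithm, similar cost).


-- ===== PORT A =====
def max_digit_frequency (s : String) : Int :=
  let d := s.toList.foldl (fun d c =>
    if PySem.Chars.isdigit c then
      if d.contains c then d.insert c (d.getD c 0 + 1) else d.insert c (1 : Int)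
    else d) PySem.Dict.empty
  if d.size ≠ 0 then
    match PySem.List.max? d.values (fun v => v) with
    | some m => m
    | none => 0
  else 0

-- ===== PORT B =====
-- the 'for c in digits' loop of Source B, state (best, cur, prev)
def pvScan : List Char → Int → Int → Option Char → Int
  | [], best, _, _ => best
  | c :: t, best, cur, prev =>
    let cur' := if some c = prev then cur + 1 else 1
    pvScan t (max best cur') cur' (some c)

def max_digit_frequency_alt (s : String) : Int :=
  let digits := PySem.List.sorted (s.toList.filter (fun c => PySem.Chars.isdigit c)) (fun c => c) false
  pvScan digits 0 0 none

-- ===== PRECONDITION & SPEC =====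
def Spec_max_digit_frequency (s : String) (out : Int) : Prop := out = max_digit_frequency_alt s
instance (s : String) (out : Int) : Decidable (Spec_max_digit_frequency s out) := by unfold Spec_max_digit_frequency; infer_instance

-- ===== CLAIM (what is proved, stated in full; the proofs are below) =====
def Claim_equal_max_digit_frequency : Prop := ∀ (s : String), Dom_max_digit_frequency s → Spec_max_digit_frequency s (max_digit_frequency s)

-- ===== LEMMAS AND PROOFS =====

-- A's guarded update is the counting insert
lemma branch_collapse (d : PySem.Dict Char Int) (c : Char) :
    (if d.contains c then d.insert c (d.getD c 0 + 1) else d.insert c (1 : Int))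
      = d.insert c (d.getD c 0 + 1) := by
  by_cases h : d.contains c
  · simp [h]
  · simp only [Bool.not_eq_true] at h
    rw [PySem.Dict.getD_of_not_contains (h := h)]
    simp [h]

-- an if-guarded fold is a fold over the filtered list
lemma foldl_if_filter (l : List Char) (d : PySem.Dict Char Int)
    (f : PySem.Dict Char Int → Char → PySem.Dict Char Int) :
    l.foldl (fun d c => if PySem.Chars.isdigit c then f d c else d) d
      = (l.filter (fun c => PySem.Chars.isdigit c)).foldl f d := by
  induction l generalizing d with
  | nil => rfl
  | cons c t ih =>
      by_cases h : PySem.Chars.isdigit c <;> simp [h, ih]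

-- run of n equal characters extends the current run by n
lemma pvScan_replicate (c : Char) (n : Nat) :
    ∀ (t : List Char) (best cur : Int), cur ≤ best →
    pvScan (List.replicate n c ++ t) best cur (some c)
      = pvScan t (max best (cur + n)) (cur + n) (some c) := by
  induction n with
  | zero => intro t best cur h; simp [max_eq_left h]
  | succ n ih =>
      intro t best cur h
      simp only [List.replicate_succ, List.cons_append, pvScan, if_true]
      rw [ih _ _ _ (le_max_right _ _)]
      have h1 : (cur + 1) + (n : Int) = cur + ((n : Nat) + 1 : Nat) := by push_cast; ring
      rw [h1]
      congr 1
      rw [max_assoc]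
      congr 1
      apply max_eq_right
      push_cast; omega

-- foldl max over a permutation
lemma foldl_max_perm {l₁ l₂ : List Int} (h : l₁.Perm l₂) (b : Int) :
    l₁.foldl max b = l₂.foldl max b := by
  exact List.Perm.foldl_op_eq h

-- two nodup lists with the same members are permutations
lemma perm_of_nodup_mem {l₁ l₂ : List Char} (h₁ : l₁.Nodup) (h₂ : l₂.Nodup)
    (h : ∀ x, x ∈ l₁ ↔ x ∈ l₂) : l₁.Perm l₂ := by
  exact (List.perm_ext_iff_of_nodup h₁ h₂).2 h

-- the run scan over a sorted list computes the max multiplicity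
-- a sorted list whose head is c starts with all its copies of c
lemma sorted_head_split : ∀ (r : List Char) (c : Char), (c :: r).Pairwise (· ≤ ·) →
    ∃ (k : Nat) (dw : List Char), r = List.replicate k c ++ dw ∧ c ∉ dw ∧ dw.Pairwise (· ≤ ·) := by
  intro r
  induction r with
  | nil => intro c _; exact ⟨0, [], by simp, by simp, by simp⟩
  | cons x r' ih =>
      intro c h
      by_cases hx : x = c
      · subst hx
        obtain ⟨k, dw, h1, h2, h3⟩ := ih x h.tail
        exact ⟨k + 1, dw, by simp [List.replicate_succ, h1], h2, h3⟩
      · refine ⟨0, x :: r', by simp, ?_, h.tail⟩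
        intro hc
        have hcx : c ≤ x := List.rel_of_pairwise_cons h (by simp)
        have hlt : c < x := lt_of_le_of_ne hcx (fun h => hx h.symm)
        rcases List.mem_cons.1 hc with h' | h'
        · exact hx h'.symm
        · exact absurd (lt_of_lt_of_le hlt (List.rel_of_pairwise_cons h.tail h')) (lt_irrefl c)

lemma foldl_add_replicate_self (c : Char) : ∀ (k : Nat),
    List.foldl PySem.Set.add ([c] : PySem.Set Char) (List.replicate k c) = [c] := by
  intro k
  induction k with
  | zero => rfl
  | succ k ih => simpa [List.replicate_succ, PySem.Set.add, PySem.Set.contains] using ih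

lemma foldl_add_cons_out (c : Char) : ∀ (l : List Char) (s : List Char), c ∉ l →
    List.foldl PySem.Set.add ((c :: s : List Char) : PySem.Set Char) l
      = c :: List.foldl PySem.Set.add (s : PySem.Set Char) l := by
  intro l
  induction l with
  | nil => intro s _; rfl
  | cons x t ih =>
      intro s hc
      have hxc : ¬ (c = x) := fun h => hc (h ▸ List.mem_cons_self)
      have hstep : PySem.Set.add ((c :: s : List Char) : PySem.Set Char) x
          = (c :: PySem.Set.add (s : PySem.Set Char) x : List Char) := by
        simp only [PySem.Set.add, PySem.Set.contains, List.contains_cons]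
        rw [show ((x == c) : Bool) = false from beq_eq_false_iff_ne.2 (fun h => hxc h.symm)]
        by_cases h : x ∈ s <;> simp [h]
      simp only [List.foldl_cons, hstep]
      exact ih _ (fun h => hc (List.mem_cons_of_mem _ h))

lemma dedup_split (c : Char) (k : Nat) (dw : List Char) (hc : c ∉ dw) :
    PySem.List.dedup (List.replicate (k + 1) c ++ dw) = c :: PySem.List.dedup dw := by
  show List.foldl PySem.Set.add PySem.Set.empty _ = _
  rw [List.foldl_append]
  have h1 : List.foldl PySem.Set.add PySem.Set.empty (List.replicate (k + 1) c)
      = ([c] : PySem.Set Char) := by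
    simp only [List.replicate_succ, List.foldl_cons]
    have : PySem.Set.add PySem.Set.empty c = ([c] : PySem.Set Char) := rfl
    rw [this, foldl_add_replicate_self]
  rw [h1]
  exact foldl_add_cons_out c dw [] hc

lemma pvScan_sorted_aux : ∀ (N : Nat) (t : List Char), t.length ≤ N →
    t.Pairwise (· ≤ ·) →
    ∀ (best cur : Int) (p : Option Char), cur ≤ best → (∀ c ∈ t, p ≠ some c) →
    pvScan t best cur p
      = ((PySem.List.dedup t).map (fun k => (t.count k : Int))).foldl max best := by
  intro N
  induction N with
  | zero =>
      intro t ht _ best cur p hcb _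
      have h0 : t = [] := List.eq_nil_of_length_eq_zero (Nat.le_zero.1 ht)
      subst h0
      simp [pvScan, PySem.List.dedup, PySem.Set.ofList, PySem.Set.empty]
  | succ N ih =>
      intro t ht hsort best cur p hcb hp
      cases t with
      | nil => simp [pvScan, PySem.List.dedup, PySem.Set.ofList, PySem.Set.empty]
      | cons c r =>
          obtain ⟨k, dw, hr, hcdw, hdwsort⟩ := sorted_head_split r c hsort
          have hpc : ¬ (some c = p) := fun h => hp c List.mem_cons_self h.symm
          have hsplit : c :: r = List.replicate (k + 1) c ++ dw := by
            simp [List.replicate_succ, hr]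
          -- one scan step, then the replicate lemma
          have hstep : pvScan (c :: r) best cur p
              = pvScan dw (max (max best 1) (1 + (k : Int))) (1 + (k : Int)) (some c) := by
            simp only [pvScan, if_neg hpc]
            rw [hr, pvScan_replicate c k dw (max best 1) 1 (le_max_right _ _)]
          rw [hstep]
          have hlen : dw.length ≤ N := by
            have := ht
            rw [hsplit] at this
            simp [List.length_append, List.length_replicate] at this
            omega
          rw [ih dw hlen hdwsort _ _ (some c) (le_max_right _ _)
            (fun x hx h => hcdw ((Option.some_inj.1 h) ▸ hx))]
          -- now identify the two folds
          rw [hsplit, dedup_split c k dw hcdw]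
          have hcount_c : ((List.replicate (k + 1) c ++ dw).count c : Int) = 1 + (k : Int) := by
            rw [List.count_append, List.count_replicate_self, List.count_eq_zero_of_not_mem hcdw]
            push_cast; ring
          have hmax : max (max best 1) (1 + (k : Int)) = max best (1 + (k : Int)) := by
            rw [max_assoc]
            congr 1
            exact max_eq_right (by omega)
          rw [List.map_cons, List.foldl_cons, hcount_c, hmax]
          congr 1
          apply List.map_congr_left
          intro x hx
          have hxdw : x ∈ dw := (PySem.List.mem_dedup _ _).1 hx
          have hxc : x ∉ List.replicate (k + 1) c := by
            intro h
            exact hcdw ((List.eq_of_mem_replicate h) ▸ hxdw)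
          rw [List.count_append, List.count_eq_zero_of_not_mem hxc]
          simp

lemma pvScan_sorted (t : List Char) (h : t.Pairwise (· ≤ ·)) :
    pvScan t 0 0 none
      = ((PySem.List.dedup t).map (fun k => (t.count k : Int))).foldl max 0 := by
  exact pvScan_sorted_aux t.length t le_rfl h 0 0 none le_rfl (by simp)

-- A's side: max over the counter's values is foldl max 0 over the counts
lemma a_side (ds : List Char) :
    (if (PySem.Dict.counter ds).size ≠ 0 then
      match PySem.List.max? (PySem.Dict.counter ds).values (fun v => v) with
      | some m => m
      | none => 0
    else 0)
      = ((PySem.List.dedup ds).map (fun k => (ds.count k : Int))).foldl max 0 := by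
  have hv : (PySem.Dict.counter ds).values
      = (PySem.List.dedup ds).map (fun k => ((ds.count k : Int))) := by
    show ((PySem.Dict.counter ds).items).map (·.2) = _
    rw [PySem.Dict.items_counter, List.map_map, ← PySem.List.dedup_eq_ofList]
    rfl
  have hsize : (PySem.Dict.counter ds).size = (PySem.Dict.counter ds).values.length := by
    show ((PySem.Dict.counter ds).items).length = ((PySem.Dict.counter ds).items.map (·.2)).length
    simp
  rw [hsize, hv]
  cases hvl : (PySem.List.dedup ds).map (fun k => ((ds.count k : Int))) with
  | nil => simp
  | cons v vs =>
      have hv0 : 0 ≤ v := by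
        have : v ∈ (PySem.List.dedup ds).map (fun k => ((ds.count k : Int))) := by
          rw [hvl]; exact List.mem_cons_self
        obtain ⟨j, _, hj⟩ := List.mem_map.1 this
        rw [← hj]
        exact_mod_cast Nat.zero_le _
      simp only [List.length_cons, PySem.List.max?_id_cons]
      have : (v :: vs).foldl max 0 = vs.foldl max (max 0 v) := rfl
      rw [this, max_eq_right hv0]
      simp

-- ===== VERDICT (by name: the statement is the Claim_ definition above) =====
theorem max_digit_frequency_spec : Claim_equal_max_digit_frequency := by
  intro s _
  unfold Spec_max_digit_frequency max_digit_frequency max_digit_frequency_alt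
  simp only [foldl_if_filter, branch_collapse,
    PySem.Dict.foldl_insert_getD_add_one_eq_counter]
  set ds := s.toList.filter (fun c => PySem.Chars.isdigit c) with hds
  rw [a_side]
  rw [pvScan_sorted _ (PySem.List.sorted_pairwise ds (fun c => c))]
  set t := PySem.List.sorted ds (fun c => c) false with hT
  have hperm : t.Perm ds := PySem.List.sorted_perm ds (fun c => c) false
  have hmap : (PySem.List.dedup t).map (fun k => ((t.count k : Int)))
      = (PySem.List.dedup t).map (fun k => ((ds.count k : Int))) := by
    apply List.map_congr_left
    intro x _
    rw [hperm.count_eq]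
  have hdperm : (PySem.List.dedup ds).Perm (PySem.List.dedup t) := by
    apply perm_of_nodup_mem (PySem.List.nodup_dedup _) (PySem.List.nodup_dedup _)
    intro x
    rw [PySem.List.mem_dedup, PySem.List.mem_dedup, hperm.mem_iff]
  rw [hmap]
  exact foldl_max_perm (hdperm.map _) 0
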